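-- pv_equiv track=rewrite | github.com/thamarnan/Algorithm | find_busiest_period.py | find_busiest_period
-- ===== SOURCE A (Python) =====
-- def find_busiest_period(data):
--
--   count = 0
--   busiest = 0
--   a = 0
--
--   for i in range(len(data)):
--     #data[i] [1487799425, 14, 1] 1x - 1x
--     if data[i][2] == 1:
--         count += data[i][1]
--     if data[i][2] == 0:
--         count -= data[i][1]
--
--
--     if (i < len(data)-1) and (data[i][0] == data[i+1][0]):
--       continue
--
--  #   else:
--     if count > busiest:
--         busiest = count
--         a = data[i][0]
--
--   return a
-- ===== SOURCE B (Python) =====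
-- def find_busiest_period(data):
--     # Backwards sweep: the concurrent load right after entry i equals the grand
--     # total of signed deltas minus the suffix sum of deltas after i.  Walking the
--     # list in reverse, an entry is the last of its timestamp run exactly when the
--     # previously visited entry (its successor) has a different timestamp; a >=
--     # update while scanning right-to-left keeps the leftmost maximal load.
--     total = 0
--     for e in data:
--         if e[2] == 1:
--             total += e[1]
--         elif e[2] == 0:
--             total -= e[1]
--     suffix = 0
--     prev_ts = None
--     best = 0
--     a = 0
--     for e in reversed(data):
--         if e[0] != prev_ts:
--             load = total - suffix
--             if load >= best and load > 0:
--                 best = load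
--                 a = e[0]
--         if e[2] == 1:
--             suffix += e[1]
--         elif e[2] == 0:
--             suffix -= e[1]
--         prev_ts = e[0]
--     return a
-- ===== Notes on version B (the rewrite author's own statement) =====
-- stated objective: alternative
-- what changed: Replaces A's forward index scan (look-ahead continue, strict running-argmax) by a two-pass backwards sweep: first sum all signed deltas, then traverse reversed(data) computing each run boundary's load as total minus the suffix sum, keeping the leftmost maximum via a >=-update; no look-ahead and no forward prefix counter.
import Mathlib
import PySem

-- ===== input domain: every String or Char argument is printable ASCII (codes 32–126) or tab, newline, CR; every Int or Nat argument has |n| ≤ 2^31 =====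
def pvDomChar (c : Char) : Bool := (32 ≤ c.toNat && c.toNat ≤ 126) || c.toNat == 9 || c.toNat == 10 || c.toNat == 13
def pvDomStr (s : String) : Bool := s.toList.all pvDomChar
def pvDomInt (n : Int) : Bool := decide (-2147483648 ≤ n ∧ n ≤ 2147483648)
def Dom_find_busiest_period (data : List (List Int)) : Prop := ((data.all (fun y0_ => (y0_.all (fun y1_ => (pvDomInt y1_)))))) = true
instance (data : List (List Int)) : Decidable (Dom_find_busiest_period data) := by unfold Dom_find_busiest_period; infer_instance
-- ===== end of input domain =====

-- B replaces A's forward index scan (look-ahead + continue, strict argmax) by a two-pass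
-- backwards sweep: total of signed deltas first, then reversed traversal computing each run
-- boundary's load as total minus suffix sum, keeping the leftmost maximum via a >= update.
-- Same cost; return value only.

-- ===== PORT A =====
-- A's loop body for index i; state is (count, busiest, a).  range(len(data)) indices are
-- in range, so data[i] is getD; the getD defaults on row elements are totality guards only
-- (a row shorter than 3 raises IndexError in Python and is excluded by Pre_).
def stepA (data : List (List Int)) (st : Int × Int × Int) (i : Nat) : Int × Int × Int :=
  let row := data.getD i []
  let c1 := if row.getD 2 0 = 1 then st.1 + row.getD 1 0 else st.1
  let c2 := if row.getD 2 0 = 0 then c1 - row.getD 1 0 else c1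
  if i < data.length - 1 ∧ row.getD 0 0 = (data.getD (i + 1) []).getD 0 0 then
    (c2, st.2.1, st.2.2)
  else if c2 > st.2.1 then (c2, c2, row.getD 0 0) else (c2, st.2.1, st.2.2)

def find_busiest_period (data : List (List Int)) : Int :=
  ((List.range data.length).foldl (stepA data) (0, 0, 0)).2.2

-- ===== PORT B =====
-- B's first loop: signed-delta accumulator (same body as the in-loop suffix update).
def deltaStep (s : Int) (e : List Int) : Int :=
  if e.getD 2 0 = 1 then s + e.getD 1 0
  else if e.getD 2 0 = 0 then s - e.getD 1 0 else s

-- B's reversed-loop body; state is (suffix, prev_ts, best, a); prev_ts None ↦ none.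
def stepBrev (total : Int) (st : Int × Option Int × Int × Int) (e : List Int) :
    Int × Option Int × Int × Int :=
  let suffix := st.1
  let prev := st.2.1
  let best := st.2.2.1
  let a := st.2.2.2
  let ba :=
    if some (e.getD 0 0) ≠ prev then
      let load := total - suffix
      if load ≥ best ∧ load > 0 then (load, e.getD 0 0) else (best, a)
    else (best, a)
  (deltaStep suffix e, some (e.getD 0 0), ba.1, ba.2)

def find_busiest_period_alt (data : List (List Int)) : Int :=
  ((data.reverse).foldl (stepBrev (data.foldl deltaStep 0)) (0, none, 0, 0)).2.2.2

-- ===== PRECONDITION & SPEC =====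
-- Pre_ excludes exactly the inputs on which A raises IndexError: a row with fewer than 3 entries.
def Pre_find_busiest_period (data : List (List Int)) : Prop :=
  ∀ row ∈ data, 3 ≤ row.length
instance (data : List (List Int)) : Decidable (Pre_find_busiest_period data) := by
  unfold Pre_find_busiest_period; infer_instance

def pvWitness_find_busiest_period : List (List Int) := [[5, 2, 1], [5, 1, 0], [7, 4, 1]]

def Spec_find_busiest_period (data : List (List Int)) (out : Int) : Prop := out = find_busiest_period_alt data
instance (data : List (List Int)) (out : Int) : Decidable (Spec_find_busiest_period data out) := by unfold Spec_find_busiest_period; infer_instance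

-- ===== CLAIM (what is proved, stated in full; the proofs are below) =====
def Claim_equal_find_busiest_period : Prop := ∀ (data : List (List Int)), Dom_find_busiest_period data → Pre_find_busiest_period data → Spec_find_busiest_period data (find_busiest_period data)

-- ===== LEMMAS AND PROOFS =====

-- signed delta and timestamp of one row
def rowDelta (e : List Int) : Int :=
  if e.getD 2 0 = 1 then e.getD 1 0 else if e.getD 2 0 = 0 then -(e.getD 1 0) else 0

def rowKey (e : List Int) : Int := e.getD 0 0

def sumD (l : List (List Int)) : Int := (l.map rowDelta).sum

-- structural rendering of A's loop
def goA : List (List Int) → Int × Int × Int → Int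
  | [], st => st.2.2
  | e :: rest, (c, b, a) =>
    if (match rest with | f :: _ => rowKey e == rowKey f | [] => false) then
      goA rest (c + rowDelta e, b, a)
    else if c + rowDelta e > b then goA rest (c + rowDelta e, c + rowDelta e, rowKey e)
    else goA rest (c + rowDelta e, b, a)

-- forward candidate list: (prefix load, timestamp) at each run boundary, incoming prefix c
def candsF : List (List Int) → Int → List (Int × Int)
  | [], _ => []
  | e :: r, c =>
    (if (match r with | f :: _ => rowKey e == rowKey f | [] => false) then []
     else [(c + rowDelta e, rowKey e)]) ++ candsF r (c + rowDelta e)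

-- key of the next element to the right (head of r, else the right-part key prev)
def hk : List (List Int) → Option Int → Option Int
  | [], prev => prev
  | e :: _, _ => some (rowKey e)

-- reverse candidate list as B sees it: value = total - suffix sum after the element
def candsR (total : Int) : List (List Int) → Int → Option Int → List (Int × Int)
  | [], _, _ => []
  | e :: r, suf, prev =>
    (if some (rowKey e) ≠ hk r prev then [(total - (suf + sumD r), rowKey e)] else [])
      ++ candsR total r suf prev

-- A's selection over candidates: strict forward argmax
def fwdFold : List (Int × Int) → Int × Int → Int × Int
  | [], st => st
  | (v, t) :: r, (b, a) => fwdFold r (if v > b then (v, t) else (b, a))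

-- B's selection over candidates: right-to-left with ≥ update and positivity
def revFold : List (Int × Int) → Int × Int → Int × Int
  | [], st => st
  | (v, t) :: r, st =>
    let s := revFold r st
    if v ≥ s.1 ∧ v > 0 then (v, t) else s

theorem c2_eq (row : List Int) (c : Int) :
    (if row.getD 2 0 = 0 then (if row.getD 2 0 = 1 then c + row.getD 1 0 else c) - row.getD 1 0
     else if row.getD 2 0 = 1 then c + row.getD 1 0 else c) = c + rowDelta row := by
  unfold rowDelta; split_ifs <;> omega

theorem deltaStep_eq (s : Int) (e : List Int) : deltaStep s e = s + rowDelta e := by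
  unfold deltaStep rowDelta; split_ifs <;> omega

theorem stepA_eq (data : List (List Int)) (st : Int × Int × Int) (i : Nat) :
    stepA data st i =
      (if i < data.length - 1 ∧ (data.getD i []).getD 0 0 = (data.getD (i + 1) []).getD 0 0 then
        (st.1 + rowDelta (data.getD i []), st.2.1, st.2.2)
      else if st.1 + rowDelta (data.getD i []) > st.2.1 then
        (st.1 + rowDelta (data.getD i []), st.1 + rowDelta (data.getD i []), (data.getD i []).getD 0 0)
      else (st.1 + rowDelta (data.getD i []), st.2.1, st.2.2)) := by
  simp only [stepA, c2_eq]

theorem stepA_shift (d : List Int) (t : List (List Int)) (s : Int × Int × Int) (i : Nat) :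
    stepA (d :: t) s (i + 1) = stepA t s i := by
  rw [stepA_eq, stepA_eq]
  simp only [List.getD_cons_succ, List.length_cons]
  have h : (i + 1 < t.length + 1 - 1) ↔ (i < t.length - 1) := by omega
  simp only [h]

theorem A_eq_goA (data : List (List Int)) : ∀ st : Int × Int × Int,
    ((List.range data.length).foldl (stepA data) st).2.2 = goA data st := by
  induction data with
  | nil => intro st; simp [goA]
  | cons d t ih =>
    intro st
    obtain ⟨c, b, a⟩ := st
    have hf : (fun (s : Int × Int × Int) (i : Nat) => stepA (d :: t) s (i + 1)) = stepA t := by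
      funext s i; exact stepA_shift d t s i
    rw [List.length_cons, List.range_succ_eq_map, List.foldl_cons, List.foldl_map, hf, ih]
    rw [stepA_eq]
    simp only [List.getD_cons_zero, List.getD_cons_succ, List.length_cons, goA]
    cases t with
    | nil =>
      simp only [List.length_nil, Nat.zero_add, Nat.lt_irrefl, false_and, if_false,
        Bool.false_eq_true, if_false, goA]
      split_ifs <;> rfl
    | cons f t' =>
      have hcond : (0 < (f :: t').length + 1 - 1 ∧ d.getD 0 0 = ((f :: t').getD 0 []).getD 0 0)
          ↔ ((rowKey d == rowKey f) = true) := by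
        simp [rowKey, beq_iff_eq]
      by_cases h : (rowKey d == rowKey f) = true
      · rw [if_pos (hcond.mpr h), if_pos h]
      · rw [if_neg (fun hh => h (hcond.mp hh)), if_neg h]
        simp only [rowKey]
        split_ifs <;> rfl

theorem goA_cons (e : List Int) (rest : List (List Int)) (c b a : Int) :
    goA (e :: rest) (c, b, a) =
      if (match rest with | f :: _ => rowKey e == rowKey f | [] => false) then
        goA rest (c + rowDelta e, b, a)
      else if c + rowDelta e > b then goA rest (c + rowDelta e, c + rowDelta e, rowKey e)
      else goA rest (c + rowDelta e, b, a) := rfl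

theorem candsF_cons (e : List Int) (rest : List (List Int)) (c : Int) :
    candsF (e :: rest) c =
      (if (match rest with | f :: _ => rowKey e == rowKey f | [] => false) then []
       else [(c + rowDelta e, rowKey e)]) ++ candsF rest (c + rowDelta e) := rfl

theorem goA_eq_fwdFold (l : List (List Int)) : ∀ c b a,
    goA l (c, b, a) = (fwdFold (candsF l c) (b, a)).2 := by
  induction l with
  | nil => intro c b a; simp [goA, candsF, fwdFold]
  | cons e r ih =>
    intro c b a
    rw [goA_cons, candsF_cons]
    cases r with
    | nil =>
      simp only [Bool.false_eq_true, if_false, List.cons_append, List.nil_append, fwdFold]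
      split_ifs <;> simp [goA, candsF, fwdFold]
    | cons f r' =>
      by_cases h : rowKey e = rowKey f
      · simp only [h, beq_self_eq_true, if_true, List.nil_append]
        exact ih (c + rowDelta e) b a
      · have hb : (rowKey e == rowKey f) = false := beq_eq_false_iff_ne.mpr h
        simp only [hb, Bool.false_eq_true, if_false, List.cons_append, List.nil_append, fwdFold]
        split_ifs with h2 <;> exact ih _ _ _

theorem candsF_eq_candsR (total : Int) (l : List (List Int)) : ∀ c suf,
    c + sumD l = total - suf → candsF l c = candsR total l suf none := by
  induction l with
  | nil => intro c suf _; simp [candsF, candsR]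
  | cons e r ih =>
    intro c suf hsum
    have hsum' : c + rowDelta e + sumD r = total - suf := by
      simp only [sumD, List.map_cons, List.sum_cons] at hsum ⊢
      omega
    have hval : total - (suf + sumD r) = c + rowDelta e := by omega
    simp only [candsF, candsR, hval, ih (c + rowDelta e) suf hsum']
    congr 1
    cases r with
    | nil => simp [hk]
    | cons f r' =>
      simp only [hk]
      by_cases h : rowKey e = rowKey f
      · simp [h]
      · simp [fun hh => h hh]

theorem sumD_foldl (l : List (List Int)) : l.foldl deltaStep 0 = sumD l := by
  have key : ∀ (l : List (List Int)) (x : Int), l.foldl deltaStep x = x + sumD l := by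
    intro l
    induction l with
    | nil => intro x; simp [sumD]
    | cons e r ih =>
      intro x
      simp only [List.foldl_cons, deltaStep_eq, ih, sumD, List.map_cons, List.sum_cons]
      ring
  simpa using key l 0

theorem sumD_cons (e : List Int) (r : List (List Int)) :
    sumD (e :: r) = rowDelta e + sumD r := by
  simp [sumD]

theorem stepBrev_eq (total : Int) (st : Int × Option Int × Int × Int) (e : List Int) :
    stepBrev total st e =
      (st.1 + rowDelta e, some (rowKey e),
        if some (rowKey e) ≠ st.2.1 then
          (if total - st.1 ≥ st.2.2.1 ∧ total - st.1 > 0 then (total - st.1, rowKey e)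
           else st.2.2)
        else st.2.2) := by
  simp only [stepBrev, deltaStep_eq, rowKey]

theorem candsR_cons (total : Int) (e : List Int) (r : List (List Int)) (suf : Int)
    (prev : Option Int) :
    candsR total (e :: r) suf prev =
      (if some (rowKey e) ≠ hk r prev then [(total - (suf + sumD r), rowKey e)] else [])
        ++ candsR total r suf prev := rfl

-- B's reversed foldl, rendered as foldr, computes (suffix total, head key, revFold cands)
theorem B_foldr (total : Int) (l : List (List Int)) : ∀ suf prev b a,
    l.foldr (fun e st => stepBrev total st e) (suf, prev, b, a)
      = (suf + sumD l, hk l prev, revFold (candsR total l suf prev) (b, a)) := by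
  induction l with
  | nil => intro suf prev b a; simp [sumD, hk, candsR, revFold]
  | cons e r ih =>
    intro suf prev b a
    rw [List.foldr_cons, ih, stepBrev_eq, candsR_cons, sumD_cons]
    show _ = (_, some (rowKey e), _)
    dsimp only
    by_cases h : some (rowKey e) ≠ hk r prev
    · rw [if_pos h, if_pos h, List.singleton_append]
      simp only [revFold, Prod.mk.injEq]
      ring_nf
      exact ⟨trivial, trivial⟩
    · rw [if_neg h, if_neg h, List.nil_append]
      simp only [Prod.mk.injEq]
      ring_nf
      exact ⟨trivial, trivial⟩

theorem revFold_pos_or_zero (cs : List (Int × Int)) :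
    (revFold cs (0, 0)).1 > 0 ∨ revFold cs (0, 0) = (0, 0) := by
  induction cs with
  | nil => right; rfl
  | cons p r ih =>
    obtain ⟨v, t⟩ := p
    simp only [revFold]
    by_cases h : v ≥ (revFold r (0, 0)).1 ∧ v > 0
    · rw [if_pos h]; left; exact h.2
    · rw [if_neg h]; exact ih

theorem fwd_vs_rev (cs : List (Int × Int)) : ∀ b a, 0 ≤ b →
    fwdFold cs (b, a) = (if (revFold cs (0, 0)).1 > b then revFold cs (0, 0) else (b, a)) := by
  induction cs with
  | nil =>
    intro b a hb
    simp only [fwdFold, revFold]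
    rw [if_neg (by omega)]
  | cons p r ih =>
    intro b a hb
    obtain ⟨v, t⟩ := p
    simp only [fwdFold, revFold]
    by_cases hv : v > b
    · rw [if_pos hv, ih v t (by omega)]
      by_cases hs : v ≥ (revFold r (0, 0)).1 ∧ v > 0
      · rw [if_pos hs]
        simp only
        rw [if_neg (by omega), if_pos hv]
      · have hlt : v < (revFold r (0, 0)).1 := by
          rcases not_and_or.mp hs with h | h <;> omega
        rw [if_neg hs, if_pos (by omega), if_pos (by omega)]
    · rw [if_neg hv, ih b a hb]
      by_cases hs : v ≥ (revFold r (0, 0)).1 ∧ v > 0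
      · rw [if_pos hs]
        simp only
        rw [if_neg (by omega), if_neg (by omega)]
      · rw [if_neg hs]

-- ===== VERDICT (by name: the statement is the Claim_ definition above) =====
theorem find_busiest_period_spec : Claim_equal_find_busiest_period := by
  intro data _ _
  unfold Spec_find_busiest_period find_busiest_period find_busiest_period_alt
  rw [A_eq_goA, sumD_foldl, List.foldl_reverse]
  rw [B_foldr (sumD data) data 0 none 0 0]
  cases data with
  | nil => simp [goA, candsR, revFold]
  | cons e l =>
    rw [goA_eq_fwdFold]
    rw [candsF_eq_candsR (sumD (e :: l)) (e :: l) 0 0 (by ring)]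
    set cs := candsR (sumD (e :: l)) (e :: l) 0 none with hcs
    rw [fwd_vs_rev cs 0 0 le_rfl]
    rcases revFold_pos_or_zero cs with h | h
    · rw [if_pos h]
    · rw [h]; simp
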